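-- pv_equiv track=rewrite | github.com/0pankajkumar/small-codes | competitiveProgramming/codechef/many_random_files/pshot.py | problemSolver2
-- ===== SOURCE A (Python) =====
-- def problemSolver2(n,stree):
-- 	ascored=0
-- 	bscored=0
-- 	amiss=0
-- 	bmiss=0
-- 	arem=n
-- 	brem=n
-- 	asTurn=True
--
-- 	for i in range(2*n):
-- 		if ascored > (bscored + brem):
-- 			return i
-- 		elif bscored > (ascored + arem):
-- 			return i
--
--
-- 		if stree[i] == '1':
-- 			if (i+1) % 2 == 0:
-- 				ascored += 1
-- 				arem -= 1
-- 			else: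
-- 				bscored += 1
-- 				brem -= 1
-- 		else:
-- 			if (i+1) % 2 == 0:
-- 				amiss += 1
-- 				arem -= 1
-- 			else:
-- 				bmiss += 1
-- 				brem -= 1
--
-- 	return n*2
-- ===== SOURCE B (Python) =====
-- def problemSolver2(n, stree):
--     # prefix sums: pa[i] / pb[i] = goals of the odd-index (A) / even-index (B) shooter
--     # among the first i shots
--     pa = [0]
--     pb = [0]
--     a = 0
--     b = 0
--     for idx, ch in enumerate(stree):
--         if ch == '1':
--             if idx % 2 == 1:
--                 a += 1
--             else:
--                 b += 1
--         pa.append(a)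
--         pb.append(b)
--     for i in range(2 * n):
--         a_rem = n - i // 2
--         b_rem = n - (i + 1) // 2
--         if pa[i] > pb[i] + b_rem or pb[i] > pa[i] + a_rem:
--             return i
--     return 2 * n
-- ===== Notes on version B (the rewrite author's own statement) =====
-- stated objective: alternative
-- what changed: B separates data from decision: a first pass builds prefix-sum goal arrays for the two shooters, then a second scan derives the remaining shots in closed form (n - i//2 and n - (i+1)//2) and reads scores from the prefix arrays, instead of A's single loop mutating six state variables (two of them dead).
-- outside the precondition, e.g. on problemSolver2(3, '1010'): A returns 4, B returns 4
import Mathlib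
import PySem

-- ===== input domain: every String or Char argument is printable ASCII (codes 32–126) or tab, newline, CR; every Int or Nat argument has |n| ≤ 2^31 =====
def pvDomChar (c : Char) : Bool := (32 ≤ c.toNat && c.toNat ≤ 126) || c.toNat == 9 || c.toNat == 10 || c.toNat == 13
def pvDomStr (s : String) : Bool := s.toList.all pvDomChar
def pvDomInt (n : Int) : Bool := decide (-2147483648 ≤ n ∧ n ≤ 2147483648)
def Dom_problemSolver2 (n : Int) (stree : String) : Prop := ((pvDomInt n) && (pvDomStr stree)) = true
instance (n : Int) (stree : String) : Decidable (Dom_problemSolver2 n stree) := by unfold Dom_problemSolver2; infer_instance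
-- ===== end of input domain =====

-- B replaces A's single loop over six mutable variables by a prefix-sum pass plus a
-- separate scan with closed-form remaining-shot counts (objective: alternative, same O(n) cost).

-- ===== PORT A =====
-- the for-loop of A: early `return i` is the `Int` result, falling off the loop returns n*2
def pvAgo (stree : String) (n : Int) : List Int → Int → Int → Int → Int → Int → Int → Int
  | [], _, _, _, _, _, _ => n * 2
  | i :: rest, ascored, bscored, amiss, bmiss, arem, brem =>
    if ascored > bscored + brem then i
    else if bscored > ascored + arem then i
    else
      -- stree[i]: in range on every input Pre_ admits (the default is never hit there)
      if (PySem.Str.pyGet? stree i).getD ' ' = '1' then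
        if PySem.Int.mod (i + 1) 2 = 0 then
          pvAgo stree n rest (ascored + 1) bscored amiss bmiss (arem - 1) brem
        else
          pvAgo stree n rest ascored (bscored + 1) amiss bmiss arem (brem - 1)
      else
        if PySem.Int.mod (i + 1) 2 = 0 then
          pvAgo stree n rest ascored bscored (amiss + 1) bmiss (arem - 1) brem
        else
          pvAgo stree n rest ascored bscored amiss (bmiss + 1) arem (brem - 1)

def problemSolver2 (n : Int) (stree : String) : Int :=
  pvAgo stree n (PySem.List.pyRange 0 (2 * n) 1) 0 0 0 0 n n

-- ===== PORT B =====
-- first pass of Source B: build the two prefix-sum lists over enumerate(stree)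
def pvBuild : List (Int × Char) → List Int → List Int → Int → Int → List Int × List Int
  | [], pa, pb, _, _ => (pa, pb)
  | (idx, ch) :: rest, pa, pb, a, b =>
    if ch = '1' then
      if PySem.Int.mod idx 2 = 1 then
        pvBuild rest (pa ++ [a + 1]) (pb ++ [b]) (a + 1) b
      else
        pvBuild rest (pa ++ [a]) (pb ++ [b + 1]) a (b + 1)
    else
      pvBuild rest (pa ++ [a]) (pb ++ [b]) a b

-- second pass of Source B: scan the shot indices, `return i` modelled as `some i`
def pvBscan (n : Int) (pa pb : List Int) : List Int → Option Int
  | [] => none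
  | i :: rest =>
    -- pa[i], pb[i]: in range on every input Pre_ admits (the default is never hit there)
    let aScore := (PySem.List.pyGet? pa i).getD 0
    let bScore := (PySem.List.pyGet? pb i).getD 0
    let aRem := n - PySem.Int.floordiv i 2
    let bRem := n - PySem.Int.floordiv (i + 1) 2
    if aScore > bScore + bRem ∨ bScore > aScore + aRem then some i
    else pvBscan n pa pb rest

def problemSolver2_alt (n : Int) (stree : String) : Int :=
  let p := pvBuild (PySem.List.enumerate stree.toList 0) [0] [0] 0 0
  (pvBscan n p.1 p.2 (PySem.List.pyRange 0 (2 * n) 1)).getD (2 * n)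

-- ===== PRECONDITION & SPEC =====
-- Pre_ requires the shot string to contain all 2*n shots; on shorter strings A raises
-- IndexError unless the shootout happens to be decided before reading past the end.
def Pre_problemSolver2 (n : Int) (stree : String) : Prop :=
  2 * n ≤ PySem.Str.len stree
instance (n : Int) (stree : String) : Decidable (Pre_problemSolver2 n stree) := by
  unfold Pre_problemSolver2; infer_instance

def pvWitness_problemSolver2 : Int × String := (2, "1011")

def Spec_problemSolver2 (n : Int) (stree : String) (out : Int) : Prop := out = problemSolver2_alt n stree
instance (n : Int) (stree : String) (out : Int) : Decidable (Spec_problemSolver2 n stree out) := by unfold Spec_problemSolver2; infer_instance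

-- ===== CLAIM (what is proved, stated in full; the proofs are below) =====
def Claim_equal_problemSolver2 : Prop := ∀ (n : Int) (stree : String), Dom_problemSolver2 n stree → Pre_problemSolver2 n stree → Spec_problemSolver2 n stree (problemSolver2 n stree)

-- ===== LEMMAS AND PROOFS =====

-- spec functions: pvA cs j / pvB cs j = goals of the odd-index / even-index shooter
-- among the first j shots of cs
def pvA (cs : List Char) : Nat → Int
  | 0 => 0
  | j + 1 => pvA cs j + (if cs.getD j ' ' = '1' ∧ j % 2 = 1 then 1 else 0)

def pvB (cs : List Char) : Nat → Int
  | 0 => 0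
  | j + 1 => pvB cs j + (if cs.getD j ' ' = '1' ∧ j % 2 = 0 then 1 else 0)

theorem pvBuild_eq (full : List Char) : ∀ (cs : List Char) (k : Nat) (pa pb : List Int),
    full.drop k = cs →
    pvBuild (PySem.List.enumerate cs (k : Int)) pa pb (pvA full k) (pvB full k)
      = (pa ++ (List.range' (k + 1) (full.length - k)).map (fun j => pvA full j),
         pb ++ (List.range' (k + 1) (full.length - k)).map (fun j => pvB full j)) := by
  intro cs
  induction cs with
  | nil =>
    intro k pa pb h
    have hk : full.length ≤ k := List.drop_eq_nil_iff.mp h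
    simp [PySem.List.enumerate, pvBuild, Nat.sub_eq_zero_of_le hk]
  | cons c cs' ih =>
    intro k pa pb h
    have hk : k < full.length := by
      by_contra hge
      push_neg at hge
      rw [List.drop_eq_nil_iff.mpr hge] at h
      cases h
    have hget : full.getD k ' ' = c := by
      have h0 : (full.drop k)[0]? = some c := by rw [h]; rfl
      rw [List.getElem?_drop] at h0
      have h0' : full[k]? = some c := by simpa using h0
      simp [List.getD, h0']
    have hdrop : full.drop (k + 1) = cs' := by
      have h1 : full.drop (k + 1) = (full.drop k).drop 1 := by
        rw [List.drop_drop]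
      rw [h1, h]; rfl
    have hmod : (PySem.Int.mod (k : Int) 2 = 1) ↔ (k % 2 = 1) := by
      rw [PySem.Int.mod_eq_emod_of_pos (by omega)]
      omega
    have hrange : List.range' (k + 1) (full.length - k) =
        (k + 1) :: List.range' (k + 2) (full.length - (k + 1)) := by
      have h2 : full.length - k = (full.length - (k + 1)) + 1 := by omega
      rw [h2, List.range'_succ]
    have hstep : ∀ (pa pb : List Int),
        pvBuild (PySem.List.enumerate (c :: cs') (k : Int)) pa pb (pvA full k) (pvB full k)
          = pvBuild (PySem.List.enumerate cs' ((k + 1 : Nat) : Int)) (pa ++ [pvA full (k + 1)])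
              (pb ++ [pvB full (k + 1)]) (pvA full (k + 1)) (pvB full (k + 1)) := by
      intro pa pb
      rw [PySem.List.enumerate_cons]
      push_cast
      have hget' : full[k]?.getD ' ' = c := by simpa [List.getD] using hget
      have hk2 : ((k : Int) % 2 = 1) ↔ k % 2 = 1 := by omega
      by_cases hc : c = '1'
      · by_cases hp : k % 2 = 1
        · have hA1 : pvA full (k + 1) = pvA full k + 1 := by simp [pvA, hget', hc, hp]
          have hB1 : pvB full (k + 1) = pvB full k := by simp [pvB, hget', hc, hp]
          rw [hA1, hB1]
          simp [pvBuild, hc, hmod, hk2, hp]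
        · have hA1 : pvA full (k + 1) = pvA full k := by simp [pvA, hget', hc, hp]
          have hB1 : pvB full (k + 1) = pvB full k + 1 := by
            simp [pvB, hget', hc, Nat.mod_two_ne_one.mp hp]
          rw [hA1, hB1]
          simp [pvBuild, hc, hmod, hk2, hp]
      · have hA1 : pvA full (k + 1) = pvA full k := by simp [pvA, hget', hc]
        have hB1 : pvB full (k + 1) = pvB full k := by simp [pvB, hget', hc]
        rw [hA1, hB1]
        simp [pvBuild, hc]
    rw [hstep, ih (k + 1) _ _ hdrop, hrange]
    simp [List.append_assoc]

theorem pvBuild_top (cs : List Char) :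
    pvBuild (PySem.List.enumerate cs 0) [0] [0] 0 0
      = ((List.range (cs.length + 1)).map (fun j => pvA cs j),
         (List.range (cs.length + 1)).map (fun j => pvB cs j)) := by
  have h := pvBuild_eq cs cs 0 [0] [0] rfl
  simp only [Nat.cast_zero, Nat.sub_zero] at h
  have h0A : pvA cs 0 = 0 := rfl
  have h0B : pvB cs 0 = 0 := rfl
  rw [h0A, h0B] at h
  rw [h, List.range_eq_range', List.range'_succ]
  simp [h0A, h0B]

theorem pvScan_eq (n : Int) (stree : String) (h2n : 2 * n ≤ (stree.toList.length : Int)) :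
    ∀ (k : Nat) (i am bm : Int), 0 ≤ i → i + (k : Int) = 2 * n →
    pvAgo stree n (PySem.List.pyRange i (2 * n) 1)
        (pvA stree.toList i.toNat) (pvB stree.toList i.toNat) am bm
        (n - PySem.Int.floordiv i 2) (n - PySem.Int.floordiv (i + 1) 2)
      = (pvBscan n ((List.range (stree.toList.length + 1)).map (fun j => pvA stree.toList j))
                   ((List.range (stree.toList.length + 1)).map (fun j => pvB stree.toList j))
                   (PySem.List.pyRange i (2 * n) 1)).getD (2 * n) := by
  intro k
  induction k with
  | zero =>
    intro i am bm h0i hik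
    have hge : (2 * n : Int) ≤ i := by push_cast at hik; omega
    rw [PySem.List.pyRange_one_eq_nil hge]
    simp [pvAgo, pvBscan]
    ring
  | succ k ih =>
    intro i am bm h0i hik
    have hilt : i < 2 * n := by push_cast at hik; omega
    have hiL : i.toNat < stree.toList.length := by omega
    rw [PySem.List.pyRange_one_cons hilt]
    have hlookA : PySem.List.pyGet?
        ((List.range (stree.toList.length + 1)).map (fun j => pvA stree.toList j)) i
        = some (pvA stree.toList i.toNat) := by
      rw [PySem.List.pyGet?_of_nonneg _ h0i]
      rw [List.getElem?_map, List.getElem?_range (show i.toNat < stree.toList.length + 1 by omega)]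
      rfl
    have hlookB : PySem.List.pyGet?
        ((List.range (stree.toList.length + 1)).map (fun j => pvB stree.toList j)) i
        = some (pvB stree.toList i.toNat) := by
      rw [PySem.List.pyGet?_of_nonneg _ h0i]
      rw [List.getElem?_map, List.getElem?_range (show i.toNat < stree.toList.length + 1 by omega)]
      rfl
    have hfd : ∀ a : Int, PySem.Int.floordiv a 2 = a / 2 := fun a =>
      PySem.Int.floordiv_eq_ediv_of_pos (by omega)
    have hm : PySem.Int.mod (i + 1) 2 = (i + 1) % 2 :=
      PySem.Int.mod_eq_emod_of_pos (by omega)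
    have hchar : (PySem.Str.pyGet? stree i).getD ' ' = stree.toList.getD i.toNat ' ' := by
      rw [PySem.Str.pyGet?_eq]
      show (PySem.List.pyGet? stree.toList i).getD ' ' = _
      rw [PySem.List.pyGet?_of_nonneg _ h0i]
      simp [List.getD]
    simp only [pvAgo, pvBscan, hlookA, hlookB, Option.getD_some, hfd, hm, hchar, gt_iff_lt]
    by_cases hg1 : pvB stree.toList i.toNat + (n - (i + 1) / 2) < pvA stree.toList i.toNat
    · simp [hg1]
    · by_cases hg2 : pvA stree.toList i.toNat + (n - i / 2) < pvB stree.toList i.toNat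
      · simp [hg1, hg2]
      · rw [if_neg hg1, if_neg hg2, if_neg (show ¬ (pvB stree.toList i.toNat + (n - (i + 1) / 2) < pvA stree.toList i.toNat ∨ pvA stree.toList i.toNat + (n - i / 2) < pvB stree.toList i.toNat) by omega)]
        have hIHg : ∀ am' bm' : Int, _ := fun am' bm' =>
          ih (i + 1) am' bm' (by omega) (by push_cast at hik ⊢; omega)
        simp only [hfd] at hIHg
        have hsucc : (i + 1).toNat = i.toNat + 1 := by omega
        by_cases hcq : stree.toList.getD i.toNat ' ' = '1'
        · by_cases hpi : (i + 1) % 2 = 0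
          · have hIH := hIHg am bm
            have eA : pvA stree.toList (i + 1).toNat = pvA stree.toList i.toNat + 1 := by
              rw [hsucc]; simp only [pvA]
              rw [if_pos ⟨hcq, show i.toNat % 2 = 1 by omega⟩]
            have eB : pvB stree.toList (i + 1).toNat = pvB stree.toList i.toNat := by
              rw [hsucc]; simp only [pvB]
              rw [if_neg (fun h => absurd h.2 (show ¬ i.toNat % 2 = 0 by omega))]; omega
            rw [if_pos hcq, if_pos hpi]
            rw [show n - i / 2 - 1 = n - (i + 1) / 2 from by omega, ← eA, ← eB]
            rw [show n - (i + 1 + 1) / 2 = n - (i + 1) / 2 from by omega] at hIH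
            exact hIH
          · have hIH := hIHg am bm
            have eA : pvA stree.toList (i + 1).toNat = pvA stree.toList i.toNat := by
              rw [hsucc]; simp only [pvA]
              rw [if_neg (fun h => absurd h.2 (show ¬ i.toNat % 2 = 1 by omega))]; omega
            have eB : pvB stree.toList (i + 1).toNat = pvB stree.toList i.toNat + 1 := by
              rw [hsucc]; simp only [pvB]
              rw [if_pos ⟨hcq, show i.toNat % 2 = 0 by omega⟩]
            rw [if_pos hcq, if_neg hpi]
            rw [show n - i / 2 = n - (i + 1) / 2 from by omega, ← eA, ← eB]
            rw [show n - (i + 1 + 1) / 2 = n - (i + 1) / 2 - 1 from by omega] at hIH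
            exact hIH
        · by_cases hpi : (i + 1) % 2 = 0
          · have hIH := hIHg (am + 1) bm
            have eA : pvA stree.toList (i + 1).toNat = pvA stree.toList i.toNat := by
              rw [hsucc]; simp only [pvA]
              rw [if_neg (fun h => hcq h.1)]; omega
            have eB : pvB stree.toList (i + 1).toNat = pvB stree.toList i.toNat := by
              rw [hsucc]; simp only [pvB]
              rw [if_neg (fun h => hcq h.1)]; omega
            rw [if_neg hcq, if_pos hpi]
            rw [show n - i / 2 - 1 = n - (i + 1) / 2 from by omega, ← eA, ← eB]
            rw [show n - (i + 1 + 1) / 2 = n - (i + 1) / 2 from by omega] at hIH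
            exact hIH
          · have hIH := hIHg am (bm + 1)
            have eA : pvA stree.toList (i + 1).toNat = pvA stree.toList i.toNat := by
              rw [hsucc]; simp only [pvA]
              rw [if_neg (fun h => hcq h.1)]; omega
            have eB : pvB stree.toList (i + 1).toNat = pvB stree.toList i.toNat := by
              rw [hsucc]; simp only [pvB]
              rw [if_neg (fun h => hcq h.1)]; omega
            rw [if_neg hcq, if_neg hpi]
            rw [show n - i / 2 = n - (i + 1) / 2 from by omega, ← eA, ← eB]
            rw [show n - (i + 1 + 1) / 2 = n - (i + 1) / 2 - 1 from by omega] at hIH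
            exact hIH

-- ===== VERDICT (by name: the statement is the Claim_ definition above) =====
theorem problemSolver2_spec : Claim_equal_problemSolver2 := by
  unfold Claim_equal_problemSolver2
  intro n stree _ hpre
  unfold Spec_problemSolver2 problemSolver2 problemSolver2_alt
  unfold Pre_problemSolver2 at hpre
  rw [PySem.Str.len_eq] at hpre
  simp only [pvBuild_top]
  by_cases hn : 0 ≤ 2 * n
  · have h := pvScan_eq n stree hpre (2 * n).toNat 0 0 0 (le_refl 0) (by omega)
    have e0A : pvA stree.toList (0 : Int).toNat = 0 := rfl
    have e0B : pvB stree.toList (0 : Int).toNat = 0 := rfl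
    have ef0 : n - PySem.Int.floordiv 0 2 = n := by
      rw [PySem.Int.floordiv_eq_ediv_of_pos (by omega)]; omega
    have ef1 : n - PySem.Int.floordiv (0 + 1) 2 = n := by
      rw [PySem.Int.floordiv_eq_ediv_of_pos (by omega)]; omega
    rw [e0A, e0B, ef0, ef1] at h
    exact h
  · rw [PySem.List.pyRange_one_eq_nil (by omega : (2 * n : Int) ≤ 0)]
    show pvAgo stree n [] 0 0 0 0 n n = _
    simp [pvAgo, pvBscan]
    ring
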